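-- pv_equiv track=rewrite | github.com/Tyeshela/Programming | Codewars/The observed PIN.py | get_pins
-- ===== SOURCE A (Python) =====
-- def get_pins(observed):
--     adjacent_digits = {
--         '1': ['1', '2', '4'],
--         '2': ['1', '2', '3', '5'],
--         '3': ['2', '3', '6'],
--         '4': ['1', '4', '5', '7'],
--         '5': ['2', '4', '5', '6', '8'],
--         '6': ['3', '5', '6', '9'],
--         '7': ['4', '7', '8'],
--         '8': ['5', '7', '8', '9', '0'],
--         '9': ['6', '8', '9'],
--         '0': ['0', '8']
--     }
--
--     if len(observed) == 1:
--         return adjacent_digits[observed[0]]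
--
--     combinations = []
--     rest = get_pins(observed[1:])
--     for digit in adjacent_digits[observed[0]]:
--         for suffix in rest:
--             combinations.append(digit + suffix)
--
--     return combinations
-- ===== SOURCE B (Python) =====
-- def get_pins(observed):
--     ADJACENT = {
--         '1': '124', '2': '1235', '3': '236', '4': '1457', '5': '24568',
--         '6': '3569', '7': '478', '8': '57890', '9': '689', '0': '08'
--     }
--     pins = ['']
--     for ch in reversed(observed):
--         pins = [d + p for d in ADJACENT[ch] for p in pins]
--     return pins
-- ===== Notes on version B (the rewrite author's own statement) =====
-- stated objective: idiomatic
-- what changed: Replaces A's right-to-left recursion (recursive suffix pins, then nested append loops prefixing each digit) with a non-recursive loop over the reversed string that extends the running suffix list by each position's adjacent digits, with the adjacency table packed as strings.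
-- crash fix: On the empty string A raises RecursionError (observed[1:] of '' is '' again, never reaching the base case) while B returns ['']; on strings with a non-digit character both raise KeyError. — e.g. on get_pins(""): A raises RecursionError, B returns [""]
import Mathlib
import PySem

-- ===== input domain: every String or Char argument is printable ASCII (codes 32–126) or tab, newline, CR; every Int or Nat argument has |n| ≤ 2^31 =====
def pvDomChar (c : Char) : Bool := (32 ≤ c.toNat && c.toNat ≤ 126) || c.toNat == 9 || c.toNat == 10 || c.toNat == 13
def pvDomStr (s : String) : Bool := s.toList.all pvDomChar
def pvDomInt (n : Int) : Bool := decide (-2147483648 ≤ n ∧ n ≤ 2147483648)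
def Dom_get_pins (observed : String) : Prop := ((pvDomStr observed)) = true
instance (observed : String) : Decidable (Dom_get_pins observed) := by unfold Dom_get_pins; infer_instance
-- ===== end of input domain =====

-- B replaces A's right-to-left recursion by an iterative loop over the reversed string
-- that extends the running suffix list (idiomatic, non-recursive).

-- ===== PORT A =====
-- A's adjacency dict: a digit's adjacent digits as a list; non-digit keys have no
-- entry (Python raises KeyError there — excluded by Pre_)
def adjC (c : Char) : List Char :=
  match c with
  | '1' => ['1', '2', '4']
  | '2' => ['1', '2', '3', '5']
  | '3' => ['2', '3', '6']
  | '4' => ['1', '4', '5', '7']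
  | '5' => ['2', '4', '5', '6', '8']
  | '6' => ['3', '5', '6', '9']
  | '7' => ['4', '7', '8']
  | '8' => ['5', '7', '8', '9', '0']
  | '9' => ['6', '8', '9']
  | '0' => ['0', '8']
  | _ => []

-- A's recursion over the character list ('' never reaches the base case in Python:
-- RecursionError, excluded by Pre_; the [] branch's value is arbitrary)
def getPinsRecA : List Char → List (List Char)
  | [] => []
  | [c] => (adjC c).map (fun d => [d])
  | c :: rest@(_ :: _) =>
      let restPins := getPinsRecA rest
      (adjC c).foldl (fun combinations digit =>
        restPins.foldl (fun acc suffix => acc ++ [digit :: suffix]) combinations) []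

def get_pins (observed : String) : List String :=
  (getPinsRecA observed.toList).map String.ofList

-- ===== PORT B =====
-- B's adjacency dict: a digit's adjacent digits packed as a string
def adjS (c : Char) : String :=
  match c with
  | '1' => "124"
  | '2' => "1235"
  | '3' => "236"
  | '4' => "1457"
  | '5' => "24568"
  | '6' => "3569"
  | '7' => "478"
  | '8' => "57890"
  | '9' => "689"
  | '0' => "08"
  | _ => ""

def get_pins_alt (observed : String) : List String :=
  (observed.toList.reverse.foldl
      (fun pins ch => (adjS ch).toList.flatMap (fun d => pins.map (d :: ·)))
      [[]]).map String.ofList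

-- ===== PRECONDITION & SPEC =====
-- Pre_ excludes exactly the inputs on which Python A raises: the empty string (infinite
-- recursion, RecursionError) and strings with a non-digit character (KeyError).
def Pre_get_pins (observed : String) : Prop :=
  observed.toList ≠ [] ∧ observed.toList.all (fun c => c.isDigit) = true
instance (observed : String) : Decidable (Pre_get_pins observed) := by
  unfold Pre_get_pins; infer_instance

def pvWitness_get_pins : String := ("85")

-- A raises RecursionError on the empty string (observed[1:] of '' is '' again); B returns [''].
def Raises_get_pins (observed : String) : Prop := observed = ""
instance (observed : String) : Decidable (Raises_get_pins observed) := by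
  unfold Raises_get_pins; infer_instance
def pvRaiseWitness_get_pins : String := ("")
def pvRaiseWitnessOut_get_pins : List String := [""]

def Spec_get_pins (observed : String) (out : List String) : Prop := out = get_pins_alt observed
instance (observed : String) (out : List String) : Decidable (Spec_get_pins observed out) := by unfold Spec_get_pins; infer_instance

-- ===== CLAIM =====
def Claim_equal_get_pins : Prop := ∀ (observed : String), Dom_get_pins observed → Pre_get_pins observed → Spec_get_pins observed (get_pins observed)
def Claim_raises_get_pins : Prop := (∀ (observed : String), Dom_get_pins observed → Raises_get_pins observed → ¬ Pre_get_pins observed) ∧ (Dom_get_pins (pvRaiseWitness_get_pins) ∧ Raises_get_pins (pvRaiseWitness_get_pins) ∧ get_pins_alt (pvRaiseWitness_get_pins) = pvRaiseWitnessOut_get_pins)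

-- ===== LEMMAS AND PROOFS =====

-- a digit character is one of the ten digit literals
theorem digit_mem (c : Char) (h : c.isDigit) :
    c = '0' ∨ c = '1' ∨ c = '2' ∨ c = '3' ∨ c = '4' ∨ c = '5' ∨ c = '6' ∨ c = '7' ∨ c = '8' ∨ c = '9' := by
  have h48 : 48 ≤ c.toNat ∧ c.toNat ≤ 57 := by
    revert h; unfold Char.isDigit Char.toNat
    simp [UInt32.le_iff_toNat_le]
  have hc : ∀ d : Char, c.toNat = d.toNat → c = d := fun d hd => Char.ext (UInt32.toNat_inj.mp hd)
  have h0 := hc '0'; have h1 := hc '1'; have h2 := hc '2'; have h3 := hc '3'; have h4 := hc '4'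
  have h5 := hc '5'; have h6 := hc '6'; have h7 := hc '7'; have h8 := hc '8'; have h9 := hc '9'
  simp only [show Char.toNat '0' = 48 from rfl, show Char.toNat '1' = 49 from rfl,
    show Char.toNat '2' = 50 from rfl, show Char.toNat '3' = 51 from rfl,
    show Char.toNat '4' = 52 from rfl, show Char.toNat '5' = 53 from rfl,
    show Char.toNat '6' = 54 from rfl, show Char.toNat '7' = 55 from rfl,
    show Char.toNat '8' = 56 from rfl, show Char.toNat '9' = 57 from rfl] at *
  rcases (by omega : c.toNat = 48 ∨ c.toNat = 49 ∨ c.toNat = 50 ∨ c.toNat = 51 ∨ c.toNat = 52 ∨ c.toNat = 53 ∨ c.toNat = 54 ∨ c.toNat = 55 ∨ c.toNat = 56 ∨ c.toNat = 57) with h|h|h|h|h|h|h|h|h|h <;>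
    simp_all

-- on digits both adjacency tables list the same neighbours
theorem adjS_eq_adjC (c : Char) (h : c.isDigit) : (adjS c).toList = adjC c := by
  rcases digit_mem c h with h|h|h|h|h|h|h|h|h|h <;> subst h <;> rfl

-- B's right fold agrees with A's once every character is a digit
theorem foldr_adjS_eq (l : List Char) (hall : l.all (fun c => c.isDigit) = true) :
    l.foldr (fun ch acc => (adjS ch).toList.flatMap (fun d => acc.map (d :: ·))) [[]]
      = l.foldr (fun c acc => (adjC c).flatMap (fun d => acc.map (d :: ·))) [[]] := by
  induction l with
  | nil => rfl
  | cons c l ih =>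
    simp only [List.all_cons, Bool.and_eq_true] at hall
    simp only [List.foldr]
    rw [ih hall.2, adjS_eq_adjC c hall.1]

theorem foldl_append_singleton (r : List (List Char)) (d : Char) (acc : List (List Char)) :
    r.foldl (fun acc suffix => acc ++ [d :: suffix]) acc = acc ++ r.map (d :: ·) := by
  induction r generalizing acc with
  | nil => simp
  | cons s r ih => simp [List.foldl, ih]

theorem foldl_outer (xs : List Char) (r : List (List Char)) (acc : List (List Char)) :
    xs.foldl (fun combinations digit =>
      r.foldl (fun acc suffix => acc ++ [digit :: suffix]) combinations) acc
      = acc ++ xs.flatMap (fun d => r.map (d :: ·)) := by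
  induction xs generalizing acc with
  | nil => simp
  | cons c xs ih =>
    rw [List.foldl_cons, foldl_append_singleton, ih]
    simp [List.append_assoc]

-- A's recursion equals a right fold of the product step over the digit list
theorem getPinsRecA_eq_foldr (l : List Char) (h : l ≠ []) :
    getPinsRecA l
      = l.foldr (fun c acc => (adjC c).flatMap (fun d => acc.map (d :: ·))) [[]] := by
  induction l with
  | nil => exact absurd rfl h
  | cons c rest ih =>
    cases rest with
    | nil =>
      simp only [getPinsRecA, List.foldr]
      induction adjC c with
      | nil => rfl
      | cons d ds ihd => simpa using ihd
    | cons c2 rest2 =>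
      simp only [getPinsRecA, foldl_outer, List.nil_append]
      rw [ih (by simp)]
      rfl

-- ===== VERDICT =====
theorem get_pins_spec : Claim_equal_get_pins := by
  intro observed _ hpre
  unfold Spec_get_pins get_pins get_pins_alt
  rw [List.foldl_reverse, getPinsRecA_eq_foldr observed.toList hpre.1,
    ← foldr_adjS_eq observed.toList hpre.2]

@[simp] theorem get_pins_raises : Claim_raises_get_pins := by
  unfold Claim_raises_get_pins
  constructor
  · intro observed _ hr hpre
    exact hpre.1 (by simp [Raises_get_pins] at hr; simp [hr])
  · exact ⟨by decide, rfl, by decide⟩
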